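-- pv_equiv track=rewrite | github.com/tmould1/dystopia-mud | game/tools/helpedit_gui.py | parse_colored_segments
-- ===== SOURCE A (Python) =====
-- TK_COLORS = {
--     '0': '#808080',   # Bright Black (gray)
--     '1': '#ff5555',   # Bright Red
--     '2': '#55ff55',   # Bright Green
--     '3': '#ffff55',   # Bright Yellow
--     '4': '#5555ff',   # Bright Blue
--     '5': '#ff55ff',   # Bright Purple
--     '6': '#55ffff',   # Bright Cyan
--     '7': '#c0c0c0',   # White
--     '8': '#404040',   # Black
--     '9': '#ffffff',   # Bright White
--     'r': '#aa0000',   # Dark Red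
--     'g': '#00aa00',   # Dark Green
--     'o': '#aa5500',   # Brown
--     'l': '#0000aa',   # Dark Blue
--     'p': '#aa00aa',   # Dark Purple
--     'c': '#00aaaa',   # Dark Cyan
--     'y': '#ffff55',   # Bright Yellow
--     'R': '#ff5555',   # Bright Red
--     'G': '#55ff55',   # Bright Green
--     'L': '#5555ff',   # Bright Blue
--     'P': '#ff55ff',   # Bright Purple
--     'C': '#55ffff',   # Bright Cyan
--     'n': '#c0c0c0',   # Reset (default text)
--     'i': None,        # Inverse (handled specially)
--     'u': None,        # Underline (handled specially)
-- }
--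
-- def parse_colored_segments(text):
--     """Parse MUD color-coded text into list of (plain_text, color_tag) tuples."""
--     segments = []
--     current_tag = 'color_n'
--     buf = []
--     i = 0
--
--     while i < len(text):
--         if text[i] == '#' and i + 1 < len(text):
--             nxt = text[i + 1]
--             # Flush buffer
--             if buf:
--                 segments.append((''.join(buf), current_tag))
--                 buf = []
--
--             if nxt == '#':
--                 buf.append('#')
--                 i += 2
--             elif nxt == '-':
--                 buf.append('~')
--                 i += 2
--             elif nxt == '+':
--                 buf.append('%')
--                 i += 2
--             elif nxt == 'x' and i + 4 < len(text) and text[i+2:i+5].isdigit():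
--                 code = int(text[i+2:i+5])
--                 current_tag = f'color_x{code}'
--                 i += 5
--             elif nxt in TK_COLORS:
--                 current_tag = f'color_{nxt}'
--                 i += 2
--             else:
--                 buf.append(text[i])
--                 i += 1
--         else:
--             buf.append(text[i])
--             i += 1
--
--     if buf:
--         segments.append((''.join(buf), current_tag))
--
--     return segments
-- ===== SOURCE B (Python) =====
-- # B: two-phase re-implementation — tokenize the text into a flat event stream
-- # (literal chars, segment boundaries, tag changes), then fold the stream into
-- # grouped (text, tag) segments.  Same return value as A; different decomposition.
--
-- _TK_KEYS = set('0123456789rgolpcyRGLPCniu')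
--
--
-- def _tokenize(text):
--     """Flatten the MUD markup into events: ('lit', ch) | ('flush', '') | ('tag', t)."""
--     toks = []
--     i, n = 0, len(text)
--     while i < n:
--         ch = text[i]
--         if ch != '#' or i + 1 == n:
--             toks.append(('lit', ch))
--             i += 1
--             continue
--         toks.append(('flush', ''))
--         nxt = text[i + 1]
--         if nxt == '#':
--             toks.append(('lit', '#')); i += 2
--         elif nxt == '-':
--             toks.append(('lit', '~')); i += 2
--         elif nxt == '+':
--             toks.append(('lit', '%')); i += 2
--         elif nxt == 'x' and i + 4 < n and text[i + 2:i + 5].isdigit():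
--             toks.append(('tag', 'color_x%d' % int(text[i + 2:i + 5]))); i += 5
--         elif nxt in _TK_KEYS:
--             toks.append(('tag', 'color_' + nxt)); i += 2
--         else:
--             toks.append(('lit', '#')); i += 1
--     return toks
--
--
-- def parse_colored_segments(text):
--     segments = []
--     tag = 'color_n'
--     buf = []
--     for kind, val in _tokenize(text):
--         if kind == 'lit':
--             buf.append(val)
--         elif kind == 'flush':
--             if buf:
--                 segments.append((''.join(buf), tag))
--                 buf = []
--         else:
--             tag = val
--     if buf:
--         segments.append((''.join(buf), tag))
--     return segments
-- ===== Notes on version B (the rewrite author's own statement) =====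
-- stated objective: alternative
-- what changed: Replaces A's single monolithic scan (which interleaves buffering, flushing and tag state) with a two-phase pipeline: a tokenizer that flattens the markup into a stream of literal/boundary/tag events, followed by a simple fold that groups the events into segments.
import Mathlib
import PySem

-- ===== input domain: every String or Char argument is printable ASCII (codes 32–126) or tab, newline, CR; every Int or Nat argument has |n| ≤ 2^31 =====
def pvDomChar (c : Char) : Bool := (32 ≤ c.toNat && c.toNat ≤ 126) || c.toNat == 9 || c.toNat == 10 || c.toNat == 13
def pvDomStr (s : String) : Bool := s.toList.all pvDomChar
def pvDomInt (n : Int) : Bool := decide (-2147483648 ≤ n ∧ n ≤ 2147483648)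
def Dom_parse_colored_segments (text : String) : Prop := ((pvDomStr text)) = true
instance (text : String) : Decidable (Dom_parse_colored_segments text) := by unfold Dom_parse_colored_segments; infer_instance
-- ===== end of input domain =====

-- B replaces A's monolithic scan by a tokenize-then-group pipeline; same return value, same cost ("alternative").

-- ===== PORT A =====
-- keys of the module constant TK_COLORS, in dict order (membership test only)
def pvTKKeys : List Char :=
  ['0','1','2','3','4','5','6','7','8','9','r','g','o','l','p','c','y','R','G','L','P','C','n','i','u']

-- numeric value of the three digits of '#x###' (= Python's int(text[i+2:i+5]))
def pvCode (a b d : Char) : Int :=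
  ((a.toNat - 48) * 100 + (b.toNat - 48) * 10 + (d.toNat - 48) : Nat)

-- A's while loop over the remaining characters; state = (segments, current_tag, buf)
def pvLoopA : List Char → List (String × String) → String → List Char → List (String × String)
  | [], segs, tag, buf => if buf = [] then segs else segs ++ [(String.ofList buf, tag)]
  | '#' :: '#' :: r, segs, tag, buf =>
      pvLoopA r (if buf = [] then segs else segs ++ [(String.ofList buf, tag)]) tag ['#']
  | '#' :: '-' :: r, segs, tag, buf =>
      pvLoopA r (if buf = [] then segs else segs ++ [(String.ofList buf, tag)]) tag ['~']
  | '#' :: '+' :: r, segs, tag, buf =>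
      pvLoopA r (if buf = [] then segs else segs ++ [(String.ofList buf, tag)]) tag ['%']
  | '#' :: 'x' :: a :: b :: d :: r, segs, tag, buf =>
      if a.isDigit ∧ b.isDigit ∧ d.isDigit then
        pvLoopA r (if buf = [] then segs else segs ++ [(String.ofList buf, tag)])
          ("color_x" ++ PySem.Int.toStr (pvCode a b d)) []
      else if ('x' : Char) ∈ pvTKKeys then
        pvLoopA (a :: b :: d :: r) (if buf = [] then segs else segs ++ [(String.ofList buf, tag)])
          ("color_" ++ String.ofList ['x']) []
      else
        pvLoopA ('x' :: a :: b :: d :: r)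
          (if buf = [] then segs else segs ++ [(String.ofList buf, tag)]) tag ['#']
  | '#' :: nxt :: r, segs, tag, buf =>
      if nxt ∈ pvTKKeys then
        pvLoopA r (if buf = [] then segs else segs ++ [(String.ofList buf, tag)])
          ("color_" ++ String.ofList [nxt]) []
      else
        pvLoopA (nxt :: r) (if buf = [] then segs else segs ++ [(String.ofList buf, tag)]) tag ['#']
  | c :: rest, segs, tag, buf => pvLoopA rest segs tag (buf ++ [c])
termination_by l => l.length
decreasing_by all_goals simp <;> omega

def parse_colored_segments (text : String) : List (String × String) :=
  pvLoopA text.toList [] "color_n" []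

-- ===== PORT B =====
-- B phase 1: event stream
inductive PvTok : Type
  | lit : Char → PvTok
  | flush : PvTok
  | tag : String → PvTok
deriving DecidableEq, Repr

def pvTokenize : List Char → List PvTok
  | [] => []
  | '#' :: '#' :: r => .flush :: .lit '#' :: pvTokenize r
  | '#' :: '-' :: r => .flush :: .lit '~' :: pvTokenize r
  | '#' :: '+' :: r => .flush :: .lit '%' :: pvTokenize r
  | '#' :: 'x' :: a :: b :: d :: r =>
      if a.isDigit ∧ b.isDigit ∧ d.isDigit then
        .flush :: .tag ("color_x" ++ PySem.Int.toStr (pvCode a b d)) :: pvTokenize r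
      else if ('x' : Char) ∈ pvTKKeys then
        .flush :: .tag ("color_" ++ String.ofList ['x']) :: pvTokenize (a :: b :: d :: r)
      else
        .flush :: .lit '#' :: pvTokenize ('x' :: a :: b :: d :: r)
  | '#' :: nxt :: r =>
      if nxt ∈ pvTKKeys then .flush :: .tag ("color_" ++ String.ofList [nxt]) :: pvTokenize r
      else .flush :: .lit '#' :: pvTokenize (nxt :: r)
  | c :: rest => .lit c :: pvTokenize rest
termination_by l => l.length
decreasing_by all_goals simp <;> omega

-- B phase 2: fold the event stream into segments
def pvGroup : List PvTok → List (String × String) → String → List Char → List (String × String)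
  | [], segs, tg, buf => if buf = [] then segs else segs ++ [(String.ofList buf, tg)]
  | .lit c :: ts, segs, tg, buf => pvGroup ts segs tg (buf ++ [c])
  | .flush :: ts, segs, tg, buf =>
      pvGroup ts (if buf = [] then segs else segs ++ [(String.ofList buf, tg)]) tg []
  | .tag t :: ts, segs, _, buf => pvGroup ts segs t buf

def parse_colored_segments_alt (text : String) : List (String × String) :=
  pvGroup (pvTokenize text.toList) [] "color_n" []

-- ===== PRECONDITION & SPEC =====
def Spec_parse_colored_segments (text : String) (out : List (String × String)) : Prop := out = parse_colored_segments_alt text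
instance (text : String) (out : List (String × String)) : Decidable (Spec_parse_colored_segments text out) := by unfold Spec_parse_colored_segments; infer_instance

-- ===== CLAIM (what is proved, stated in full; the proofs are below) =====
def Claim_equal_parse_colored_segments : Prop := ∀ (text : String), Dom_parse_colored_segments text → Spec_parse_colored_segments text (parse_colored_segments text)

-- ===== LEMMAS AND PROOFS =====
theorem pvGroup_tokenize_eq_loopA (l : List Char) (segs : List (String × String))
    (tg : String) (buf : List Char) :
    pvGroup (pvTokenize l) segs tg buf = pvLoopA l segs tg buf := by
  fun_induction pvLoopA l segs tg buf <;>
    simp_all [pvTokenize, pvGroup, pvTKKeys] <;>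
    split_ifs <;> simp_all [pvGroup]

-- ===== VERDICT (by name: the statement is the Claim_ definition above) =====
theorem parse_colored_segments_spec : Claim_equal_parse_colored_segments := by
  intro text _
  unfold Spec_parse_colored_segments parse_colored_segments parse_colored_segments_alt
  exact (pvGroup_tokenize_eq_loopA _ _ _ _).symm
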